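-- pv_equiv track=rewrite | github.com/double-ai/formulaone-dataset-release | examples/wmc_dominating_set.py | bag_selected_weight
-- ===== SOURCE A (Python) =====
-- MOD = 1_000_000_007
--
-- def bag_selected_weight(
--     assign_mask: int,
--     bag_vertices: tuple[int, ...],
--     vertex_weights: dict[int, int],
-- ) -> int:
--     """Sum of weights of vertices in the bag that are selected (IN)."""
--     s = 0
--     for idx, v in enumerate(bag_vertices):
--         if (assign_mask >> idx) & 1:
--             s += vertex_weights[v]
--     return s % MOD
-- ===== SOURCE B (Python) =====
-- MOD = 1_000_000_007
--
-- def bag_selected_weight(assign_mask, bag_vertices, vertex_weights):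
--     # Divide and conquer: split the bag in half, sum the two halves recursively,
--     # passing the low bits to the left half and the mask shifted by the split to the right.
--     def rec(mask, vs):
--         if not vs:
--             return 0
--         if len(vs) == 1:
--             return vertex_weights[vs[0]] if mask & 1 else 0
--         h = len(vs) // 2
--         return rec(mask, vs[:h]) + rec(mask >> h, vs[h:])
--     return rec(assign_mask, tuple(bag_vertices)) % MOD
-- ===== Notes on version B (the rewrite author's own statement) =====
-- stated objective: alternative
-- what changed: B replaces A's single linear enumerate-and-bit-test pass with a divide-and-conquer recursion that splits the bag in half, passing the low bits of the mask to the left half and the mask shifted by the split point to the right half, and adds the two partial sums.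
import Mathlib
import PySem

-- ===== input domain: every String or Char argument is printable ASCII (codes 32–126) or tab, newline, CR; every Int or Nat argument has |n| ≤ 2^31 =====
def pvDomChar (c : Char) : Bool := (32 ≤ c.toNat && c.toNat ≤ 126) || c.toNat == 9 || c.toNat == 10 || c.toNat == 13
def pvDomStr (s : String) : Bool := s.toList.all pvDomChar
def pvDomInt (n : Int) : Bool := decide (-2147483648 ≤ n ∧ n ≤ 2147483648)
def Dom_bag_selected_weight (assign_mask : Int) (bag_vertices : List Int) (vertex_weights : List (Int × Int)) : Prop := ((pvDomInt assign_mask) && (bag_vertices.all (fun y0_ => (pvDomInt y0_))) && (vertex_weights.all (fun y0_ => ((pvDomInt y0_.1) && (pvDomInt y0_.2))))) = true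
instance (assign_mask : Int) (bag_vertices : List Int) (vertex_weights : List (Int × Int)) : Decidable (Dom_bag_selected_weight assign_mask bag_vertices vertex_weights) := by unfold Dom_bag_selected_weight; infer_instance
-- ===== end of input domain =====

-- B computes the sum by divide-and-conquer recursion (split the bag in half, low bits to the
-- left half, mask shifted by the split to the right half) instead of A's single linear
-- enumerate pass; objective: alternative (same cost, different decomposition).


-- vertex_weights[v]: first-match association-list lookup; the KeyError case is excluded by Pre_
def pvW (vertex_weights : List (Int × Int)) (v : Int) : Int := (vertex_weights.lookup v).getD 0

-- loop body of A: `if (assign_mask >> idx) & 1: s += vertex_weights[v]`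
-- (enumerate indices are ≥ 0, so `.toNat` on them is exact)
def pvStep (vertex_weights : List (Int × Int)) (assign_mask : Int) : Int → Int × Int → Int :=
  fun s p => if PySem.Int.band (assign_mask >>> p.1.toNat) 1 = 1 then s + pvW vertex_weights p.2 else s

-- ===== PORT A =====
def bag_selected_weight (assign_mask : Int) (bag_vertices : List Int) (vertex_weights : List (Int × Int)) : Int :=
  PySem.Int.mod
    ((PySem.List.enumerate bag_vertices 0).foldl (pvStep vertex_weights assign_mask) 0)
    1000000007

-- ===== PORT B =====
-- Source B's inner `rec(mask, vs)`; vs[:h] / vs[h:] with 0 ≤ h ≤ len(vs) are exactly take h / drop h,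
-- and Python's `mask >> h` on ints is the arithmetic shift `>>> (h : Nat)`.
def pvRec (vertex_weights : List (Int × Int)) (mask : Int) (vs : List Int) : Int :=
  match vs with
  | [] => 0
  | [v] => if PySem.Int.band mask 1 = 1 then pvW vertex_weights v else 0
  | v1 :: v2 :: rest =>
    pvRec vertex_weights mask ((v1 :: v2 :: rest).take ((v1 :: v2 :: rest).length / 2)) +
    pvRec vertex_weights (mask >>> ((v1 :: v2 :: rest).length / 2))
      ((v1 :: v2 :: rest).drop ((v1 :: v2 :: rest).length / 2))
termination_by vs.length
decreasing_by
  · simp [List.length_take]; omega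
  · simp [List.length_drop]; omega

def bag_selected_weight_alt (assign_mask : Int) (bag_vertices : List Int) (vertex_weights : List (Int × Int)) : Int :=
  PySem.Int.mod (pvRec vertex_weights assign_mask bag_vertices) 1000000007

-- ===== PRECONDITION & SPEC =====
-- Pre_ excludes exactly the inputs on which Python A raises KeyError: a selected position whose
-- bag vertex is not a key of vertex_weights.
def Pre_bag_selected_weight (assign_mask : Int) (bag_vertices : List Int) (vertex_weights : List (Int × Int)) : Prop :=
  ∀ p ∈ PySem.List.enumerate bag_vertices 0,
    PySem.Int.band (assign_mask >>> p.1.toNat) 1 = 1 → (vertex_weights.lookup p.2).isSome = true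
instance (assign_mask : Int) (bag_vertices : List Int) (vertex_weights : List (Int × Int)) : Decidable (Pre_bag_selected_weight assign_mask bag_vertices vertex_weights) := by unfold Pre_bag_selected_weight; infer_instance
def pvWitness_bag_selected_weight : Int × List Int × (List (Int × Int)) := (5, [1, 2, 3], [(1, 10), (2, 20), (3, 30)])

def Spec_bag_selected_weight (assign_mask : Int) (bag_vertices : List Int) (vertex_weights : List (Int × Int)) (out : Int) : Prop := out = bag_selected_weight_alt assign_mask bag_vertices vertex_weights
instance (assign_mask : Int) (bag_vertices : List Int) (vertex_weights : List (Int × Int)) (out : Int) : Decidable (Spec_bag_selected_weight assign_mask bag_vertices vertex_weights out) := by unfold Spec_bag_selected_weight; infer_instance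

-- ===== CLAIM (what is proved, stated in full; the proofs are below) =====
def Claim_equal_bag_selected_weight : Prop := ∀ (assign_mask : Int) (bag_vertices : List Int) (vertex_weights : List (Int × Int)), Dom_bag_selected_weight assign_mask bag_vertices vertex_weights → Pre_bag_selected_weight assign_mask bag_vertices vertex_weights → Spec_bag_selected_weight assign_mask bag_vertices vertex_weights (bag_selected_weight assign_mask bag_vertices vertex_weights)

-- ===== LEMMAS AND PROOFS =====

-- common reference value: bit j of the mask selects the j-th listed vertex
def pvSel (vw : List (Int × Int)) : Int → List Int → Int
  | _, [] => 0
  | m, v :: t => (if m % 2 = 1 then pvW vw v else 0) + pvSel vw (m >>> (1 : Nat)) t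

theorem pvShiftSucc (m : Int) (k : Nat) : m >>> (k + 1) = (m >>> (1:Nat)) >>> k := by
  rw [Int.shiftRight_eq_div_pow, Int.shiftRight_eq_div_pow, Int.shiftRight_eq_div_pow,
    Int.ediv_ediv_of_nonneg (by positivity : (0:Int) ≤ ((2^1 : Nat) : Int))]
  congr 1
  push_cast
  ring

theorem pvBandOne (a : Int) : (PySem.Int.band a 1 = 1) ↔ (a % 2 = 1) := by
  rw [PySem.Int.band_one, PySem.Int.mod_eq_emod_of_pos (by norm_num)]

theorem pvStep_zero (vw : List (Int × Int)) (m s x : Int) :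
    pvStep vw m s (0, x) = if m % 2 = 1 then s + pvW vw x else s := by
  unfold pvStep
  have h0 : m >>> (((0:Int)).toNat) = m := by
    rw [show ((0:Int)).toNat = 0 from rfl, Int.shiftRight_eq_div_pow]
    simp
  simp only [h0, pvBandOne]

theorem pvStep_shift (vw : List (Int × Int)) (m s x : Int) (k : Nat) :
    pvStep vw m s ((0:Int) + k + 1, x) = pvStep vw (m >>> (1:Nat)) s ((0:Int) + k, x) := by
  unfold pvStep
  have h1 : (((0:Int) + k + 1)).toNat = k + 1 := by omega
  have h2 : (((0:Int) + k)).toNat = k := by omega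
  simp only [h1, h2]
  rw [pvShiftSucc]

theorem pvEnumShift {α : Type} (f : Int → Int × α → Int) (t : List α) : ∀ (j s : Int),
    (PySem.List.enumerate t (j + 1)).foldl f s
      = (PySem.List.enumerate t j).foldl (fun s p => f s (p.1 + 1, p.2)) s := by
  induction t with
  | nil => intro j s; simp [PySem.List.enumerate_nil]
  | cons v t ih =>
      intro j s
      simp only [PySem.List.enumerate_cons, List.foldl_cons]
      exact ih (j + 1) (f s (j + 1, v))

-- A's fold equals the reference value
theorem pvFoldA (vw : List (Int × Int)) : ∀ (bv : List Int) (m s : Int),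
    (PySem.List.enumerate bv 0).foldl (pvStep vw m) s = s + pvSel vw m bv := by
  intro bv
  induction bv with
  | nil => intro m s; simp [PySem.List.enumerate_nil, pvSel]
  | cons v t ih =>
      intro m s
      simp only [PySem.List.enumerate_cons, List.foldl_cons]
      rw [pvEnumShift]
      have hcongr :
          (PySem.List.enumerate t 0).foldl (fun s p => pvStep vw m s (p.1 + 1, p.2))
              (pvStep vw m s (0, v))
            = (PySem.List.enumerate t 0).foldl (pvStep vw (m >>> (1:Nat)))
              (pvStep vw m s (0, v)) := by
        apply PySem.List.foldl_congr_mem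
        intro acc p hp
        obtain ⟨k, hk, rfl⟩ := (PySem.List.mem_enumerate_iff _ _ _).1 hp
        exact pvStep_shift vw m acc t[k] k
      rw [hcongr, ih (m >>> (1:Nat))]
      rw [pvStep_zero]
      simp only [pvSel]
      by_cases h : m % 2 = 1
      · rw [if_pos h, if_pos h]; ring
      · rw [if_neg h, if_neg h]; ring

-- the reference value splits along ++, shifting the mask by the left length
theorem pvSelAppend (vw : List (Int × Int)) : ∀ (xs ys : List Int) (m : Int),
    pvSel vw m (xs ++ ys) = pvSel vw m xs + pvSel vw (m >>> xs.length) ys := by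
  intro xs
  induction xs with
  | nil =>
      intro ys m
      have : m >>> (([] : List Int).length) = m := by
        rw [List.length_nil, Int.shiftRight_eq_div_pow]; simp
      rw [this]; simp [pvSel]
  | cons x xs ih =>
      intro ys m
      simp only [List.cons_append, pvSel, List.length_cons]
      rw [ih, pvShiftSucc m xs.length]
      ring

-- B's recursion equals the reference value
theorem pvRecSel (vw : List (Int × Int)) : ∀ (n : Nat) (vs : List Int), vs.length ≤ n →
    ∀ (m : Int), pvRec vw m vs = pvSel vw m vs := by
  intro n
  induction n with
  | zero =>
      intro vs hvs m
      have : vs = [] := List.length_eq_zero_iff.1 (Nat.le_zero.1 hvs)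
      subst this; simp [pvRec, pvSel]
  | succ n ih =>
      intro vs hvs m
      match vs with
      | [] => simp [pvRec, pvSel]
      | [v] =>
          simp only [pvRec, pvSel, pvBandOne]
          rw [add_zero]
      | v1 :: v2 :: rest =>
          rw [pvRec]
          set l := v1 :: v2 :: rest with hl
          have hlen : 2 ≤ l.length := by simp [hl]
          set h := l.length / 2 with hh
          have h1 : 1 ≤ h := by omega
          have h2 : h < l.length := by omega
          have htake : (l.take h).length = h := by
            rw [List.length_take]; omega
          rw [ih (l.take h) (by omega) m,
              ih (l.drop h) (by rw [List.length_drop]; omega) (m >>> h)]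
          have := pvSelAppend vw (l.take h) (l.drop h) m
          rw [List.take_append_drop, htake] at this
          rw [this]

-- ===== VERDICT (by name: the statement is the Claim_ definition above) =====
theorem bag_selected_weight_spec : Claim_equal_bag_selected_weight := by
  intro m bv vw _ _
  unfold Spec_bag_selected_weight bag_selected_weight bag_selected_weight_alt
  rw [pvFoldA vw bv m 0, pvRecSel vw bv.length bv le_rfl m, zero_add]
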